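-- pv_equiv track=rewrite | github.com/MrBrantCode/unitest_baseline | mut_generate/mist_train_cf/cf_15394/solution.py | group_and_sort
-- ===== SOURCE A (Python) =====
-- def group_and_sort(lst, shared_key, other_key):
--     groups = {}
--
--     for item in lst:
--         key = item[shared_key]
--         if key not in groups:
--             groups[key] = []
--         groups[key].append(item)
--
--     sorted_groups = sorted(groups.values(), key=lambda x: (sum(d[shared_key] for d in x), min(d[other_key] for d in x)), reverse=True)
--
--     return sorted_groups
-- ===== SOURCE B (Python) =====
-- def group_and_sort(lst, shared_key, other_key):
--     # No dict of groups: collect the distinct keys in first-occurrence order,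
--     # sort the keys by aggregates computed from the flat list, then rebuild
--     # each group by filtering the original list.
--     keys = []
--     for item in lst:
--         k = item[shared_key]
--         if k not in keys:
--             keys.append(k)
--
--     def agg(k):
--         return (sum(it[shared_key] for it in lst if it[shared_key] == k),
--                 min(it[other_key] for it in lst if it[shared_key] == k))
--
--     keys.sort(key=agg, reverse=True)
--     return [[it for it in lst if it[shared_key] == k] for k in keys]
-- ===== Notes on version B (the rewrite author's own statement) =====
-- stated objective: alternative
-- what changed: B eliminates the dict of group lists: it collects the distinct keys in first-occurrence order, sorts those keys by aggregates computed over the flat input list, and rebuilds each group by filtering the original list per key, instead of A's dict-based grouping followed by sorting the group lists with an aggregate-recomputing key.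
import Mathlib
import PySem

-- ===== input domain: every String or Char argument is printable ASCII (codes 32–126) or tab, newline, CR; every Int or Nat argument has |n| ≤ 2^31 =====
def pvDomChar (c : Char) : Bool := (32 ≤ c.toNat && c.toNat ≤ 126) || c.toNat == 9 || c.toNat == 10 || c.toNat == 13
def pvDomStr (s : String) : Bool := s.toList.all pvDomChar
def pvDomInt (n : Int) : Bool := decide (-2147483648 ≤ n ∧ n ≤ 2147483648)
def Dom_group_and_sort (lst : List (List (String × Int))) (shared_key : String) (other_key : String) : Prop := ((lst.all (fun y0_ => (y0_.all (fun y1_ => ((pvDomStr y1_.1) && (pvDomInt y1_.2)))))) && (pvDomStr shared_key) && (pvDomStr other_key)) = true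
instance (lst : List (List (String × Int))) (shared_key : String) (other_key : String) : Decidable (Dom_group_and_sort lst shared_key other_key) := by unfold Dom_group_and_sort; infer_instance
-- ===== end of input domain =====

-- B drops the dict of groups entirely: it collects the distinct keys in first-occurrence
-- order, sorts the KEYS by aggregates computed from the flat input list, and rebuilds each
-- group by filtering the original list (objective: alternative algorithm/data structure).

-- ===== PORT A =====
-- item[key] (first-match assoc lookup); returns 0 where Python raises KeyError —
-- exactly those inputs are excluded by Pre_group_and_sort.
def pvItemGet (d : List (String × Int)) (k : String) : Int :=
  (PySem.Dict.mk d).getD k 0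

-- the body of A's grouping loop
def pvStepA (shared_key : String)
    (groups : PySem.Dict Int (List (List (String × Int)))) (item : List (String × Int)) :
    PySem.Dict Int (List (List (String × Int))) :=
  let key := pvItemGet item shared_key
  let groups := if groups.contains key then groups else groups.insert key []
  groups.insert key (groups.getD key [] ++ [item])

def group_and_sort (lst : List (List (String × Int))) (shared_key : String) (other_key : String) : List (List (List (String × Int))) :=
  let groups := lst.foldl (pvStepA shared_key) PySem.Dict.empty
  -- sorted(groups.values(), key=lambda x: (sum(…), min(…)), reverse=True); the `.getD 0`
  -- covers min() of an empty group, which never occurs (groups are built nonempty)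
  PySem.List.sorted2 groups.values
    (fun x => (x.map (fun d => pvItemGet d shared_key)).sum)
    (fun x => ((PySem.List.min? (x.map (fun d => pvItemGet d other_key)) (fun v => v)).getD 0))
    true

-- ===== PORT B =====
def group_and_sort_alt (lst : List (List (String × Int))) (shared_key : String) (other_key : String) : List (List (List (String × Int))) :=
  -- keys: distinct shared_key values in first-occurrence order ('if k not in keys: append')
  let keys : PySem.Set Int :=
    lst.foldl (fun s item => PySem.Set.add s (pvItemGet item shared_key)) PySem.Set.empty
  -- keys.sort(key=agg, reverse=True) with agg recomputed from the flat list; the `.getD 0`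
  -- covers min() of an empty selection, which never occurs for a key drawn from lst
  let sortedKeys :=
    PySem.List.sorted2 keys
      (fun k => ((lst.filter (fun it => pvItemGet it shared_key == k)).map (fun d => pvItemGet d shared_key)).sum)
      (fun k => ((PySem.List.min? ((lst.filter (fun it => pvItemGet it shared_key == k)).map (fun d => pvItemGet d other_key)) (fun v => v)).getD 0))
      true
  sortedKeys.map (fun k => lst.filter (fun it => pvItemGet it shared_key == k))

-- ===== PRECONDITION & SPEC =====
-- Pre_ excludes exactly the inputs on which Python A raises KeyError: some item lacking
-- shared_key or other_key.
def Pre_group_and_sort (lst : List (List (String × Int))) (shared_key : String) (other_key : String) : Prop :=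
  ∀ item ∈ lst, shared_key ∈ item.map Prod.fst ∧ other_key ∈ item.map Prod.fst

instance (lst : List (List (String × Int))) (shared_key : String) (other_key : String) : Decidable (Pre_group_and_sort lst shared_key other_key) := by unfold Pre_group_and_sort; infer_instance

def pvWitness_group_and_sort : (List (List (String × Int))) × String × String :=
  ([[("a", 1), ("b", 5)], [("a", 2), ("b", 3)], [("a", 1), ("b", 4)]], "a", "b")

def Spec_group_and_sort (lst : List (List (String × Int))) (shared_key : String) (other_key : String) (out : List (List (List (String × Int)))) : Prop := out = group_and_sort_alt lst shared_key other_key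
instance (lst : List (List (String × Int))) (shared_key : String) (other_key : String) (out : List (List (List (String × Int)))) : Decidable (Spec_group_and_sort lst shared_key other_key out) := by unfold Spec_group_and_sort; infer_instance

-- ===== CLAIM (what is proved, stated in full; the proofs are below) =====
def Claim_equal_group_and_sort : Prop := ∀ (lst : List (List (String × Int))) (shared_key : String) (other_key : String), Dom_group_and_sort lst shared_key other_key → Pre_group_and_sort lst shared_key other_key → Spec_group_and_sort lst shared_key other_key (group_and_sort lst shared_key other_key)

-- ===== LEMMAS AND PROOFS =====

-- the group of key k, as B rebuilds it
def pvGroupOf (lst : List (List (String × Int))) (sk : String) (k : Int) :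
    List (List (String × Int)) :=
  lst.filter (fun it => pvItemGet it sk == k)

-- A's loop body is a dict 'modify' appending the item
theorem pvStepA_eq_modify (sk : String) (G : PySem.Dict Int (List (List (String × Int))))
    (item : List (String × Int)) :
    pvStepA sk G item = G.modify (pvItemGet item sk) [] (· ++ [item]) := by
  simp only [pvStepA]
  by_cases hc : G.contains (pvItemGet item sk) = true
  · simp only [hc, if_true]
    rfl
  · have hc' : G.contains (pvItemGet item sk) = false := by simpa using hc
    simp only [hc', Bool.false_eq_true, if_false, PySem.Dict.getD_insert_self,
      PySem.Dict.insert_insert_self, List.nil_append]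
    rw [show G.modify (pvItemGet item sk) [] (· ++ [item])
          = G.insert (pvItemGet item sk) (G.getD (pvItemGet item sk) [] ++ [item]) from rfl,
        PySem.Dict.getD_of_not_contains G [] hc']
    rfl

-- A's whole grouping loop, as a modify-fold
theorem pvFoldA_eq (sk : String) (lst : List (List (String × Int))) :
    lst.foldl (pvStepA sk) PySem.Dict.empty
      = lst.foldl (fun d it => d.modify (pvItemGet it sk) [] (· ++ [it])) PySem.Dict.empty := by
  suffices h : ∀ (l : List (List (String × Int))) (G : PySem.Dict Int (List (List (String × Int)))),
      l.foldl (pvStepA sk) G = l.foldl (fun d it => d.modify (pvItemGet it sk) [] (· ++ [it])) G from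
    h lst PySem.Dict.empty
  intro l
  induction l with
  | nil => intro G; rfl
  | cons x t ih => intro G; rw [List.foldl_cons, List.foldl_cons, pvStepA_eq_modify]; exact ih _

-- each group in A's dict is a filter of the original list
theorem pvFoldA_getD (sk : String) (lst : List (List (String × Int))) (k : Int) :
    (lst.foldl (fun d it => d.modify (pvItemGet it sk) [] (· ++ [it]))
        (PySem.Dict.empty : PySem.Dict Int (List (List (String × Int))))).getD k []
      = pvGroupOf lst sk k := by
  have h := PySem.Dict.getD_foldl_modify_append
      (l := lst.map (fun it => (pvItemGet it sk, it)))
      (d := (PySem.Dict.empty : PySem.Dict Int (List (List (String × Int))))) (c := k)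
  rw [List.foldl_map] at h
  simp only [PySem.Dict.getD_empty, List.nil_append] at h
  rw [h, pvGroupOf, List.filter_map]
  simp [List.map_map, Function.comp_def]

-- A's dict keys are the distinct shared_key values in first-occurrence order
theorem pvFoldA_keys (sk : String) (lst : List (List (String × Int))) :
    (lst.foldl (fun d it => d.modify (pvItemGet it sk) [] (· ++ [it]))
        (PySem.Dict.empty : PySem.Dict Int (List (List (String × Int))))).keys
      = PySem.Set.ofList (lst.map (fun it => pvItemGet it sk)) := by
  rw [PySem.Dict.keys_foldl_modify_key (key := fun it => pvItemGet it sk)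
      (f := fun _ it => (· ++ [it]))]
  simp [PySem.Dict.keys_empty, PySem.Set.update_nil_left]

theorem pvFoldA_nodup (sk : String) (lst : List (List (String × Int))) :
    (lst.foldl (fun d it => d.modify (pvItemGet it sk) [] (· ++ [it]))
        (PySem.Dict.empty : PySem.Dict Int (List (List (String × Int))))).keys.Nodup :=
  PySem.Dict.nodup_keys_foldl_modify_key lst (fun it => pvItemGet it sk) []
    (fun _ it => (· ++ [it])) PySem.Dict.empty PySem.Dict.nodup_keys_empty

-- B's key-collecting loop is exactly those distinct keys
theorem pvKeysB (sk : String) (lst : List (List (String × Int))) :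
    lst.foldl (fun s it => PySem.Set.add s (pvItemGet it sk)) PySem.Set.empty
      = PySem.Set.ofList (lst.map (fun it => pvItemGet it sk)) := by
  rw [← PySem.Set.update_map_eq_foldl_add]
  exact PySem.Set.update_nil_left _

-- sorting a mapped list = mapping the sorted list, when the key functions commute with the map
theorem pvInsertBy_map {α β : Type} (g : α → β) (bf : β → β → Bool) (bf' : α → α → Bool)
    (h : ∀ a b, bf (g a) (g b) = bf' a b) (x : α) (l : List α) :
    PySem.List.insertBy bf (g x) (l.map g) = (PySem.List.insertBy bf' x l).map g := by
  induction l with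
  | nil => rfl
  | cons y ys ih =>
    simp only [List.map_cons, PySem.List.insertBy, h x y]
    by_cases hb : bf' x y = true
    · simp [hb]
    · simp only [hb, Bool.false_eq_true, if_false, List.map_cons]
      rw [ih]

theorem pvFoldl_insertBy_map {α β : Type} (g : α → β) (bf : β → β → Bool) (bf' : α → α → Bool)
    (h : ∀ a b, bf (g a) (g b) = bf' a b) :
    ∀ (l acc : List α),
      (l.map g).foldl (fun a x => PySem.List.insertBy bf x a) (acc.map g)
        = (l.foldl (fun a x => PySem.List.insertBy bf' x a) acc).map g := by
  intro l
  induction l with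
  | nil => intro acc; rfl
  | cons y ys ih =>
    intro acc
    rw [List.map_cons, List.foldl_cons, List.foldl_cons, pvInsertBy_map g bf bf' h y acc]
    exact ih _

theorem pvSorted2_map (lst : List (List (String × Int))) (sk ok : String) (keys : List Int) :
    PySem.List.sorted2 (keys.map (pvGroupOf lst sk))
      (fun x => (x.map (fun d => pvItemGet d sk)).sum)
      (fun x => ((PySem.List.min? (x.map (fun d => pvItemGet d ok)) (fun v => v)).getD 0))
      true
    = (PySem.List.sorted2 keys
        (fun k => ((lst.filter (fun it => pvItemGet it sk == k)).map (fun d => pvItemGet d sk)).sum)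
        (fun k => ((PySem.List.min? ((lst.filter (fun it => pvItemGet it sk == k)).map (fun d => pvItemGet d ok)) (fun v => v)).getD 0))
        true).map (pvGroupOf lst sk) := by
  simp only [PySem.List.sorted2, if_true]
  exact pvFoldl_insertBy_map (pvGroupOf lst sk) _ _ (fun a b => rfl) keys []

-- ===== VERDICT (by name: the statement is the Claim_ definition above) =====
theorem group_and_sort_spec : Claim_equal_group_and_sort := by
  intro lst sk ok _dom _pre
  simp only [Spec_group_and_sort, group_and_sort, group_and_sort_alt]
  rw [pvFoldA_eq, pvKeysB]
  have hvals :
      (lst.foldl (fun d it => d.modify (pvItemGet it sk) [] (· ++ [it]))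
          (PySem.Dict.empty : PySem.Dict Int (List (List (String × Int))))).values
        = (PySem.Set.ofList (lst.map (fun it => pvItemGet it sk))).map (pvGroupOf lst sk) := by
    rw [PySem.Dict.values_eq_map_keys _ (pvFoldA_nodup sk lst) []]
    rw [pvFoldA_keys]
    exact List.map_congr_left (fun k _ => pvFoldA_getD sk lst k)
  rw [hvals, pvSorted2_map]
  rfl
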